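-- pv_equiv track=rewrite | github.com/JC241001/cp1404practicals | prac_09/cleanup_files.py | get_fixed_filename
-- ===== SOURCE A (Python) =====
-- def get_fixed_filename(filename):
--     """Return a 'fixed' version of filename."""
--     # First, replace the spaces and .TXT (the easy part)
--     filename = filename.replace(" ", "_").replace(".TXT", ".txt")
--
--     # Clean up rest of string
--     new_name = ""
--     for index, char in enumerate(filename):
--         prev = index - 1
--         if index == 0 or filename[prev] == '_' or filename[prev] == '(':
--             new_name = new_name + char.upper()
--         elif (char == '(' and filename[prev] != '_') or (char.isupper() and filename[prev] != '_' and filename[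
--             prev] != '('):
--             new_name = new_name + '_' + char
--         else:
--             new_name = new_name + char
--
--     return new_name
-- ===== SOURCE B (Python) =====
-- def get_fixed_filename(filename):
--     """Return a 'fixed' version of filename."""
--     fixed = filename.replace(" ", "_").replace(".TXT", ".txt")
--     # Pass 1: insert '_' before any '(' or uppercase letter whose predecessor
--     # in the fixed string is not '_' or '('.
--     mid = []
--     for i, ch in enumerate(fixed):
--         if (ch == '(' or ch.isupper()) and i > 0 and fixed[i - 1] not in '_(':
--             mid.append('_')
--         mid.append(ch)
--     # Pass 2: upper-case the first character and every character that
--     # immediately follows '_' or '(' in the intermediate string.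
--     out = []
--     for i, ch in enumerate(mid):
--         if i == 0 or mid[i - 1] in '_(':
--             out.append(ch.upper())
--         else:
--             out.append(ch)
--     return ''.join(out)
-- ===== Notes on version B (the rewrite author's own statement) =====
-- stated objective: alternative
-- what changed: A's single loop with three interleaved branches (capitalise / insert underscore / copy) is re-decomposed into two simple linear passes: pass 1 only inserts '_' before '(' or an uppercase letter not already preceded by '_' or '(', and pass 2 only upper-cases the first character and each character following '_' or '('.
import Mathlib
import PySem

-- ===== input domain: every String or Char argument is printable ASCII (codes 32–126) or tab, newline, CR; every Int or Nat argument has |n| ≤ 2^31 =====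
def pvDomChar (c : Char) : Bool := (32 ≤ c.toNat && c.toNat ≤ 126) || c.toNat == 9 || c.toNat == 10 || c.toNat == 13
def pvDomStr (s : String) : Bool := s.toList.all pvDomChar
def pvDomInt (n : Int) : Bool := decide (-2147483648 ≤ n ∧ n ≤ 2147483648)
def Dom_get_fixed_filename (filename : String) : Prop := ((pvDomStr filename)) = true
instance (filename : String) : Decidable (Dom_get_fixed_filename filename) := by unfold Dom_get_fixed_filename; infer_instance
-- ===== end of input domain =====

-- B re-decomposes A's single three-branch loop into two simple passes (insert underscores, then capitalise
-- after separators); same result, same O(n) cost — objective: alternative decomposition.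

-- ===== PORT A =====
-- loop body of A: i = index, o = filename[index-1] (as pyGet?), c = char
def pvBodyA (i : Int) (o : Option Char) (c : Char) : List Char :=
  if i == 0 || o == some '_' || o == some '(' then [PySem.Chars.upperChar c]
  else if (c == '(' && !(o == some '_')) || (PySem.Chars.isupper c && !(o == some '_') && !(o == some '(')) then
    ['_', c]
  else [c]

def get_fixed_filename (filename : String) : String :=
  let fixed := PySem.Str.replace (PySem.Str.replace filename " " "_") ".TXT" ".txt"
  let cs := fixed.toList
  let new_name := (PySem.List.enumerate cs 0).foldl
    (fun new_name p => new_name ++ pvBodyA p.1 (PySem.List.pyGet? cs (p.1 - 1)) p.2) []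
  String.ofList new_name

-- ===== PORT B =====
-- pass-1 body: prepend '_' when ch is '(' or uppercase, i > 0 and fixed[i-1] not in '_('
def pvBody1 (i : Int) (o : Option Char) (c : Char) : List Char :=
  (if (c == '(' || PySem.Chars.isupper c) && decide (0 < i) && !(o == some '_' || o == some '(') then ['_']
   else []) ++ [c]

-- pass-2 body: upper-case at i = 0 or after '_' / '('
def pvBody2 (i : Int) (o : Option Char) (c : Char) : List Char :=
  if i == 0 || o == some '_' || o == some '(' then [PySem.Chars.upperChar c] else [c]

def get_fixed_filename_alt (filename : String) : String :=
  let fixed := PySem.Str.replace (PySem.Str.replace filename " " "_") ".TXT" ".txt"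
  let cs := fixed.toList
  let mid := (PySem.List.enumerate cs 0).foldl
    (fun mid p => mid ++ pvBody1 p.1 (PySem.List.pyGet? cs (p.1 - 1)) p.2) []
  let out := (PySem.List.enumerate mid 0).foldl
    (fun out p => out ++ pvBody2 p.1 (PySem.List.pyGet? mid (p.1 - 1)) p.2) []
  String.ofList out

-- ===== PRECONDITION & SPEC =====
def Spec_get_fixed_filename (filename : String) (out : String) : Prop := out = get_fixed_filename_alt filename
instance (filename : String) (out : String) : Decidable (Spec_get_fixed_filename filename out) := by unfold Spec_get_fixed_filename; infer_instance

-- ===== CLAIM (what is proved, stated in full; the proofs are below) =====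
def Claim_equal_get_fixed_filename : Prop := ∀ (filename : String), Dom_get_fixed_filename filename → Spec_get_fixed_filename filename (get_fixed_filename filename)

-- ===== LEMMAS AND PROOFS =====

-- prev-char recursion: R gets the previous character (none at the start)
def pvRec (R : Option Char → Char → List Char) : Option Char → List Char → List Char
  | _, [] => []
  | po, c :: rest => R po c ++ pvRec R (some c) rest

-- the three loop bodies as prev-char steps
def pvStepA : Option Char → Char → List Char
  | none, c => [PySem.Chars.upperChar c]
  | some a, c =>
    if a == '_' || a == '(' then [PySem.Chars.upperChar c]
    else if (c == '(' && !(a == '_')) || (PySem.Chars.isupper c && !(a == '_') && !(a == '(')) then ['_', c]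
    else [c]

def pvStep1 : Option Char → Char → List Char
  | none, c => [c]
  | some a, c => (if (c == '(' || PySem.Chars.isupper c) && !(a == '_' || a == '(') then ['_'] else []) ++ [c]

def pvStep2 : Option Char → Char → List Char
  | none, c => [PySem.Chars.upperChar c]
  | some a, c => if a == '_' || a == '(' then [PySem.Chars.upperChar c] else [c]

-- an enumerate/pyGet? loop over pre ++ suf is the prev-char recursion on suf
lemma pv_enum_rec (B : Int → Option Char → Char → List Char) (R : Option Char → Char → List Char)
    (h0 : ∀ o c, B 0 o c = R none c)
    (hs : ∀ (i : Int) a c, 0 < i → B i (some a) c = R (some a) c) :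
    ∀ (suf pre : List Char),
      (PySem.List.enumerate suf (pre.length : Int)).flatMap
        (fun p => B p.1 (PySem.List.pyGet? (pre ++ suf) (p.1 - 1)) p.2)
      = pvRec R pre.getLast? suf := by
  intro suf
  induction suf with
  | nil => intro pre; simp [PySem.List.enumerate_nil, pvRec]
  | cons c rest ih =>
    intro pre
    rw [PySem.List.enumerate_cons, List.flatMap_cons]
    dsimp only
    by_cases hp : pre = []
    · subst hp
      have htail := ih [c]
      simp only [List.length_cons, List.length_nil, List.nil_append, List.singleton_append,
        List.getLast?_singleton, Nat.cast_zero, List.getLast?_nil] at htail ⊢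
      rw [h0]
      simp only [pvRec, zero_add]
      norm_num at htail
      rw [htail]
    · have hlen : 1 ≤ pre.length := List.length_pos_iff.mpr hp
      have hco : (pre.length : Int) - 1 = ((pre.length - 1 : Nat) : Int) := by omega
      have hget : PySem.List.pyGet? (pre ++ c :: rest) ((pre.length : Int) - 1)
          = some (pre.getLast hp) := by
        rw [hco, PySem.List.pyGet?_natCast, List.getElem?_append_left (by omega)]
        rw [← List.getLast?_eq_getElem?, List.getLast?_eq_some_getLast hp]
      rw [hget, hs _ _ _ (by exact_mod_cast hlen)]
      have htail := ih (pre ++ [c])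
      have h1 : ((pre ++ [c]).length : Int) = (pre.length : Int) + 1 := by
        simp [List.length_append]
      have h2 : (pre ++ [c]) ++ rest = pre ++ c :: rest := by simp
      rw [h1, h2, List.getLast?_concat] at htail
      rw [htail, List.getLast?_eq_some_getLast hp]
      simp only [pvRec]

lemma pv_enum_rec0 (B : Int → Option Char → Char → List Char) (R : Option Char → Char → List Char)
    (h0 : ∀ o c, B 0 o c = R none c)
    (hs : ∀ (i : Int) a c, 0 < i → B i (some a) c = R (some a) c) (cs : List Char) :
    (PySem.List.enumerate cs 0).flatMap
      (fun p => B p.1 (PySem.List.pyGet? cs (p.1 - 1)) p.2) = pvRec R none cs := by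
  have := pv_enum_rec B R h0 hs cs []
  simpa using this

lemma pvBodyA_zero : ∀ o c, pvBodyA 0 o c = pvStepA none c := by
  intro o c; simp [pvBodyA, pvStepA]
lemma pvBodyA_succ : ∀ (i : Int) a c, 0 < i → pvBodyA i (some a) c = pvStepA (some a) c := by
  intro i a c hi
  have : (i == 0) = false := by simp only [beq_eq_false_iff_ne]; omega
  simp [pvBodyA, pvStepA, this]

lemma pvBody1_zero : ∀ o c, pvBody1 0 o c = pvStep1 none c := by
  intro o c; simp [pvBody1, pvStep1]
lemma pvBody1_succ : ∀ (i : Int) a c, 0 < i → pvBody1 i (some a) c = pvStep1 (some a) c := by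
  intro i a c hi
  simp [pvBody1, pvStep1, hi]

lemma pvBody2_zero : ∀ o c, pvBody2 0 o c = pvStep2 none c := by
  intro o c; simp [pvBody2, pvStep2]
lemma pvBody2_succ : ∀ (i : Int) a c, 0 < i → pvBody2 i (some a) c = pvStep2 (some a) c := by
  intro i a c hi
  have : (i == 0) = false := by simp only [beq_eq_false_iff_ne]; omega
  simp [pvBody2, pvStep2, this]

lemma pv_upper_fix (c : Char) (h : (c == '(' || PySem.Chars.isupper c) = true) :
    PySem.Chars.upperChar c = c := by
  rcases Bool.or_eq_true_iff.mp h with h | h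
  · have : c = '(' := by simpa using h
    subst this; decide
  · simp only [PySem.Chars.isupper, Bool.and_eq_true, decide_eq_true_eq,
      Char.le_def, UInt32.le_iff_toNat_le] at h
    simp only [PySem.Chars.upperChar, PySem.Chars.islower, Bool.and_eq_true, decide_eq_true_eq,
      Char.le_def, UInt32.le_iff_toNat_le]
    split_ifs with hl
    · exfalso
      obtain ⟨h1, h2⟩ := h
      obtain ⟨h3, h4⟩ := hl
      simp at h1 h2 h3 h4
      omega
    · rfl

-- the two passes of B compose to A's single pass
lemma pv_passes (cs : List Char) : ∀ po : Option Char,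
    pvRec pvStep2 po (pvRec pvStep1 po cs) = pvRec pvStepA po cs := by
  induction cs with
  | nil => intro po; simp [pvRec]
  | cons c rest ih =>
    intro po
    cases po with
    | none =>
      simp only [pvRec, pvStep1, pvStep2, pvStepA, List.singleton_append]
      rw [ih (some c)]
    | some a =>
      by_cases h1 : (a == '_' || a == '(') = true
      · simp [pvRec, pvStep1, pvStep2, pvStepA, h1, ih (some c)]
      · have h1f : (a == '_' || a == '(') = false := by simpa using h1
        have ha1 : (a == '_') = false := by
          rcases Bool.or_eq_false_iff.mp h1f with ⟨x, _⟩; exact x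
        have ha2 : (a == '(') = false := by
          rcases Bool.or_eq_false_iff.mp h1f with ⟨_, x⟩; exact x
        by_cases h2 : (c == '(' || PySem.Chars.isupper c) = true
        · have hu : ('_' : Char) == '_' || ('_' : Char) == '(' := by decide
          simp [pvRec, pvStep1, pvStep2, pvStepA, ha1, ha2, h2, pv_upper_fix c h2,
            ih (some c)]
        · have h2f : (c == '(' || PySem.Chars.isupper c) = false := by simpa using h2
          have hc1 : (c == '(') = false := by
            rcases Bool.or_eq_false_iff.mp h2f with ⟨x, _⟩; exact x
          have hc2 : (PySem.Chars.isupper c) = false := by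
            rcases Bool.or_eq_false_iff.mp h2f with ⟨_, x⟩; exact x
          simp [pvRec, pvStep1, pvStep2, pvStepA, ha1, ha2, hc1, hc2, ih (some c)]

-- ===== VERDICT (by name: the statement is the Claim_ definition above) =====
theorem get_fixed_filename_spec : Claim_equal_get_fixed_filename := by
  intro filename _
  unfold Spec_get_fixed_filename get_fixed_filename get_fixed_filename_alt
  set cs := (PySem.Str.replace (PySem.Str.replace filename " " "_") ".TXT" ".txt").toList with hcs
  simp only []
  rw [PySem.List.foldl_append_eq_flatMap, PySem.List.foldl_append_eq_flatMap,
    PySem.List.foldl_append_eq_flatMap]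
  simp only [List.nil_append]
  rw [pv_enum_rec0 pvBodyA pvStepA pvBodyA_zero pvBodyA_succ cs,
    pv_enum_rec0 pvBody1 pvStep1 pvBody1_zero pvBody1_succ cs,
    pv_enum_rec0 pvBody2 pvStep2 pvBody2_zero pvBody2_succ (pvRec pvStep1 none cs),
    pv_passes cs none]
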